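-- pv_equiv track=rewrite | github.com/1572903465/PythonProjects | test/grammer/NFA到DFA2.py | p_move
-- ===== SOURCE A (Python) =====
-- S = [(0, 'eps', 1), (0, 'eps', 7), (1, 'eps', 2), (1, 'eps', 4), (2, 'a', 3),
--      (3, 'eps', 6), (4, 'b', 5), (5, 'eps', 6), (6, 'eps', 1), (6, 'eps', 7), (7, 'a', 8),
--      (8, 'b', 9), (9, 'b', 10)]
--
-- def p_move(I, a):# 状态集的move运算
--     T1 = []
--     for q in I:
--         for t0, sym, t1 in S:
--             if t0 == q and sym == a and t1 not in T1:
--                 T1.append(t1)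
--
--     T1.sort()
--     return T1
-- ===== SOURCE B (Python) =====
-- S = [(0, 'eps', 1), (0, 'eps', 7), (1, 'eps', 2), (1, 'eps', 4), (2, 'a', 3),
--      (3, 'eps', 6), (4, 'b', 5), (5, 'eps', 6), (6, 'eps', 1), (6, 'eps', 7), (7, 'a', 8),
--      (8, 'b', 9), (9, 'b', 10)]
--
-- def p_move(I, a):
--     iset = set(I)
--     res = set()
--     for t0, sym, t1 in S:
--         if t0 in iset and sym == a:
--             res.add(t1)
--     return sorted(res)
-- ===== Notes on version B (the rewrite author's own statement) =====
-- stated objective: simpler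
-- what changed: Replaces A's nested loop (for each state q in I, scan the whole edge table S with a membership-checked list append) by a single pass over S collecting targets into a set, with I turned into a set once; the result is sorted(result_set).
import Mathlib
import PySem

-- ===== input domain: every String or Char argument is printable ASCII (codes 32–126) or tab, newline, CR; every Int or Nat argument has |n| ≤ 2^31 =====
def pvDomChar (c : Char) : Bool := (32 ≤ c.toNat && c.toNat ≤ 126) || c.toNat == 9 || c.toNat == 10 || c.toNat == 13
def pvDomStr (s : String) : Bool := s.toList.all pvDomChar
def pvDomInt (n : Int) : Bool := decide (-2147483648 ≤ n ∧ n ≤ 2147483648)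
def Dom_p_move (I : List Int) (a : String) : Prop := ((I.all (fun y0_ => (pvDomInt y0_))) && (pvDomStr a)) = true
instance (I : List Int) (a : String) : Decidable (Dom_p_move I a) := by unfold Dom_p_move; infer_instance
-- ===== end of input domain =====

-- B replaces A's nested loops by one pass over the edge table with set membership on I; simpler, return value only.

-- the module-level transition table S
def pvS : List (Int × String × Int) :=
  [(0, "eps", 1), (0, "eps", 7), (1, "eps", 2), (1, "eps", 4), (2, "a", 3),
   (3, "eps", 6), (4, "b", 5), (5, "eps", 6), (6, "eps", 1), (6, "eps", 7), (7, "a", 8),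
   (8, "b", 9), (9, "b", 10)]

-- ===== PORT A =====
def p_move (I : List Int) (a : String) : List Int :=
  let T1 : List Int :=
    I.foldl (fun T1 q =>
      pvS.foldl (fun T1 t =>
        if t.1 = q ∧ t.2.1 = a ∧ t.2.2 ∉ T1 then T1 ++ [t.2.2] else T1) T1) []
  PySem.List.sorted T1 (fun x => x) false

-- ===== PORT B =====
def p_move_alt (I : List Int) (a : String) : List Int :=
  let iset : PySem.Set Int := PySem.Set.ofList I
  let res : PySem.Set Int :=
    pvS.foldl (fun res t =>
      if t.1 ∈ iset ∧ t.2.1 = a then PySem.Set.add res t.2.2 else res) PySem.Set.empty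
  PySem.List.sorted res (fun x => x) false

-- ===== PRECONDITION & SPEC =====
def Spec_p_move (I : List Int) (a : String) (out : List Int) : Prop := out = p_move_alt I a
instance (I : List Int) (a : String) (out : List Int) : Decidable (Spec_p_move I a out) := by unfold Spec_p_move; infer_instance

-- ===== CLAIM (what is proved, stated in full; the proofs are below) =====
def Claim_equal_p_move : Prop := ∀ (I : List Int) (a : String), Dom_p_move I a → Spec_p_move I a (p_move I a)

-- ===== LEMMAS AND PROOFS =====

-- A's loop step equals a guarded set-insertion
theorem pv_stepA_eq (q : Int) (a : String) (T1 : List Int) (t : Int × String × Int) :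
    (if t.1 = q ∧ t.2.1 = a ∧ t.2.2 ∉ T1 then T1 ++ [t.2.2] else T1)
    = (if t.1 = q ∧ t.2.1 = a then PySem.Set.add T1 t.2.2 else T1) := by
  unfold PySem.Set.add
  split_ifs <;> simp_all

-- A's inner loop over an arbitrary edge list: membership characterisation
theorem pv_innerA_mem (ts : List (Int × String × Int)) (q : Int) (a : String)
    (T1 : List Int) (x : Int) :
    x ∈ ts.foldl (fun T1 t =>
        if t.1 = q ∧ t.2.1 = a ∧ t.2.2 ∉ T1 then T1 ++ [t.2.2] else T1) T1
    ↔ x ∈ T1 ∨ (q, a, x) ∈ ts := by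
  simp only [pv_stepA_eq]
  induction ts generalizing T1 with
  | nil => simp
  | cons t ts ih =>
    obtain ⟨t1, sym, t2⟩ := t
    simp only [List.foldl_cons, ih, List.mem_cons]
    split_ifs with h
    · obtain ⟨rfl, rfl⟩ := h
      simp only [PySem.Set.mem_add, Prod.mk.injEq]
      tauto
    · simp only [Prod.mk.injEq]
      constructor
      · tauto
      · rintro (hx | (⟨h1, h2, h3⟩ | hx)) <;> tauto
  
-- A's inner loop preserves Nodup
theorem pv_innerA_nodup (ts : List (Int × String × Int)) (q : Int) (a : String)
    (T1 : List Int) (h : T1.Nodup) :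
    (ts.foldl (fun T1 t =>
        if t.1 = q ∧ t.2.1 = a ∧ t.2.2 ∉ T1 then T1 ++ [t.2.2] else T1) T1).Nodup := by
  simp only [pv_stepA_eq]
  induction ts generalizing T1 with
  | nil => exact h
  | cons t ts ih =>
    simp only [List.foldl_cons]
    apply ih
    split_ifs
    · exact PySem.Set.nodup_add _ _ h
    · exact h

-- A's outer loop: membership characterisation
theorem pv_outerA_mem (I : List Int) (a : String) (T1 : List Int) (x : Int) :
    x ∈ I.foldl (fun T1 q =>
        pvS.foldl (fun T1 t =>
          if t.1 = q ∧ t.2.1 = a ∧ t.2.2 ∉ T1 then T1 ++ [t.2.2] else T1) T1) T1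
    ↔ x ∈ T1 ∨ ∃ q ∈ I, (q, a, x) ∈ pvS := by
  induction I generalizing T1 with
  | nil => simp
  | cons q I ih =>
    simp only [List.foldl_cons, ih, pv_innerA_mem, List.mem_cons]
    constructor
    · rintro ((hx | hx) | ⟨q', hq', hx⟩)
      · exact Or.inl hx
      · exact Or.inr ⟨q, Or.inl rfl, hx⟩
      · exact Or.inr ⟨q', Or.inr hq', hx⟩
    · rintro (hx | ⟨q', (rfl | hq'), hx⟩)
      · exact Or.inl (Or.inl hx)
      · exact Or.inl (Or.inr hx)
      · exact Or.inr ⟨q', hq', hx⟩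

-- A's outer loop preserves Nodup
theorem pv_outerA_nodup (I : List Int) (a : String) (T1 : List Int) (h : T1.Nodup) :
    (I.foldl (fun T1 q =>
        pvS.foldl (fun T1 t =>
          if t.1 = q ∧ t.2.1 = a ∧ t.2.2 ∉ T1 then T1 ++ [t.2.2] else T1) T1) T1).Nodup := by
  induction I generalizing T1 with
  | nil => exact h
  | cons q I ih => exact ih _ (pv_innerA_nodup _ _ _ _ h)

-- B's loop: membership characterisation
theorem pv_loopB_mem (ts : List (Int × String × Int)) (I : List Int) (a : String)
    (res : PySem.Set Int) (x : Int) :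
    x ∈ ts.foldl (fun res t =>
        if t.1 ∈ PySem.Set.ofList I ∧ t.2.1 = a then PySem.Set.add res t.2.2 else res) res
    ↔ x ∈ res ∨ ∃ t ∈ ts, t.1 ∈ I ∧ t.2.1 = a ∧ t.2.2 = x := by
  induction ts generalizing res with
  | nil => simp
  | cons t ts ih =>
    simp only [List.foldl_cons, ih, List.mem_cons]
    split_ifs with h
    · rw [PySem.Set.mem_add]
      constructor
      · rintro ((hx | rfl) | ⟨t', ht', hp⟩)
        · exact Or.inl hx
        · exact Or.inr ⟨t, Or.inl rfl, (PySem.Set.mem_ofList _ _).mp h.1, h.2, rfl⟩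
        · exact Or.inr ⟨t', Or.inr ht', hp⟩
      · rintro (hx | ⟨t', (rfl | ht'), hp⟩)
        · exact Or.inl (Or.inl hx)
        · exact Or.inl (Or.inr hp.2.2.symm)
        · exact Or.inr ⟨t', ht', hp⟩
    · constructor
      · rintro (hx | ⟨t', ht', hp⟩)
        · exact Or.inl hx
        · exact Or.inr ⟨t', Or.inr ht', hp⟩
      · rintro (hx | ⟨t', (rfl | ht'), hp⟩)
        · exact Or.inl hx
        · exact absurd ⟨(PySem.Set.mem_ofList _ _).mpr hp.1, hp.2.1⟩ h
        · exact Or.inr ⟨t', ht', hp⟩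

-- B's loop preserves Nodup
theorem pv_loopB_nodup (ts : List (Int × String × Int)) (I : List Int) (a : String)
    (res : PySem.Set Int) (h : res.Nodup) :
    (ts.foldl (fun res t =>
        if t.1 ∈ PySem.Set.ofList I ∧ t.2.1 = a then PySem.Set.add res t.2.2 else res) res).Nodup := by
  induction ts generalizing res with
  | nil => exact h
  | cons t ts ih =>
    simp only [List.foldl_cons]
    apply ih
    split_ifs
    · exact PySem.Set.nodup_add _ _ h
    · exact h

-- ===== VERDICT (by name: the statement is the Claim_ definition above) =====
theorem p_move_spec : Claim_equal_p_move := by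
  intro I a _
  unfold Spec_p_move p_move p_move_alt
  apply PySem.List.sorted_eq_sorted_of_perm _ _ _ (fun x y h => h)
  rw [List.perm_ext_iff_of_nodup (pv_outerA_nodup I a [] List.nodup_nil)
      (pv_loopB_nodup pvS I a PySem.Set.empty List.nodup_nil)]
  intro x
  rw [pv_outerA_mem, pv_loopB_mem]
  simp only [List.not_mem_nil, false_or]
  constructor
  · rintro ⟨q, hq, hx⟩
    exact Or.inr ⟨(q, a, x), hx, hq, rfl, rfl⟩
  · rintro (hx | ⟨⟨t0, sym, t1⟩, ht, h1, rfl, rfl⟩)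
    · simp at hx
    · exact ⟨t0, h1, ht⟩
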